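-- pv_equiv track=rewrite | github.com/itsSunnys/Codility | Excercises/MaxCounters.py | solution
-- ===== SOURCE A (Python) =====
-- def solution(N, A):
--     counters = [0] * N
--     highest = 0
--     max_to_set = 0
--
--     for item in A:
--         if item == N + 1:
--             max_to_set = highest
--         else:
--             counters[item - 1] = max(counters[item - 1], max_to_set) + 1
--             if counters[item - 1] > highest:
--                 highest = counters[item - 1]
--
--     for i in range(N):
--         counters[i] = max(counters[i], max_to_set)
--
--     return counters
-- ===== SOURCE B (Python) =====
-- def solution(N, A):
--     # Segment decomposition: between max-all operations, only plain increments
--     # happen, so keep per-segment counts plus a global base offset.  A max-all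
--     # folds the segment's maximum into the base and clears the counts; the
--     # answer is base + count for every slot.
--     base = 0
--     counts = [0] * N
--     for item in A:
--         if item == N + 1:
--             base += max(counts, default=0)
--             counts = [0] * N
--         else:
--             counts[item - 1] += 1
--     return [base + c for c in counts]
-- ===== Notes on version B (the rewrite author's own statement) =====
-- stated objective: alternative
-- what changed: B decomposes A by segments between max-all operations: it keeps only per-segment increment counts and a scalar base offset (no running highest, no per-increment max), folds max(counts) into base at each max-all, and emits base+count per slot, replacing A's lazy max_to_set bookkeeping and final reconciliation pass.
import Mathlib
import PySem

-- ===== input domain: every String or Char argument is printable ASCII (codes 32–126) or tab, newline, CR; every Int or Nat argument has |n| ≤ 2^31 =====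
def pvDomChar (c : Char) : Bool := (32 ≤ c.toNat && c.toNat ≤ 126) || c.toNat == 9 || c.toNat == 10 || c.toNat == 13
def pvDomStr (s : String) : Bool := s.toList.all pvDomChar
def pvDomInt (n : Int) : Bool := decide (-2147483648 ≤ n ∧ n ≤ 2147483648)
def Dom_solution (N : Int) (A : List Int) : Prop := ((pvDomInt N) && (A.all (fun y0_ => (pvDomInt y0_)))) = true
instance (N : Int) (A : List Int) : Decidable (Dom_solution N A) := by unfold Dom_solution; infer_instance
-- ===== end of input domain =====

-- B replaces A's lazy max_to_set bookkeeping and final reconciliation pass with a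
-- segment decomposition: per-segment increment counts plus a scalar base offset,
-- max(counts) folded into the base at each max-all, output = base + count per slot.

-- ===== PORT A =====
def stepA (N : Int) (st : List Int × Int × Int) (item : Int) : List Int × Int × Int :=
  if item = N + 1 then (st.1, st.2.1, st.2.1)
  else
    let v := max (PySem.List.pyGetD st.1 (item - 1) 0) st.2.2 + 1
    (PySem.List.pySetD st.1 (item - 1) v,
     if v > st.2.1 then v else st.2.1, st.2.2)

def solution (N : Int) (A : List Int) : List Int :=
  let st := A.foldl (stepA N) (List.replicate N.toNat 0, 0, 0)
  (PySem.List.pyRange 0 N 1).foldl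
    (fun c i => PySem.List.pySetD c i (max (PySem.List.pyGetD c i 0) st.2.2)) st.1

-- ===== PORT B =====
def stepB (N : Int) (st : Int × List Int) (item : Int) : Int × List Int :=
  if item = N + 1 then (st.1 + PySem.List.maxD st.2 (fun x => x) 0, List.replicate N.toNat 0)
  else (st.1, PySem.List.pySetD st.2 (item - 1) (PySem.List.pyGetD st.2 (item - 1) 0 + 1))

def solution_alt (N : Int) (A : List Int) : List Int :=
  let st := A.foldl (stepB N) (0, List.replicate N.toNat 0)
  st.2.map (fun c => st.1 + c)

-- ===== PRECONDITION & SPEC =====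
-- Pre_ excludes exactly the inputs on which A raises IndexError: some item that is not
-- N+1 whose (Python, possibly negative) index item-1 is out of range for a list of length N.
def Pre_solution (N : Int) (A : List Int) : Prop :=
  ∀ item ∈ A, item = N + 1 ∨ PySem.Raise.InRange N.toNat (item - 1)
instance (N : Int) (A : List Int) : Decidable (Pre_solution N A) := by
  unfold Pre_solution; infer_instance

def pvWitness_solution : Int × List Int := (3, [1, 4, 2, 0, 4, 3])

def Spec_solution (N : Int) (A : List Int) (out : List Int) : Prop := out = solution_alt N A
instance (N : Int) (A : List Int) (out : List Int) : Decidable (Spec_solution N A out) := by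
  unfold Spec_solution; infer_instance

-- ===== CLAIM (what is proved, stated in full; the proofs are below) =====
def Claim_equal_solution : Prop :=
  ∀ (N : Int) (A : List Int), Dom_solution N A → Pre_solution N A →
    Spec_solution N A (solution N A)

-- ===== LEMMAS AND PROOFS =====

-- max(xs, default=0) of B's port, as a running max, for lists of nonnegative entries
theorem maxD_eq_foldl (xs : List Int) (h : ∀ x ∈ xs, 0 ≤ x) :
    PySem.List.maxD xs (fun x => x) 0 = xs.foldl max 0 := by
  cases xs with
  | nil => rfl
  | cons x t =>
    unfold PySem.List.maxD
    rw [PySem.List.max?_id_cons]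
    simp only [Option.getD_some, List.foldl_cons]
    have hx : max 0 x = x := max_eq_right (h x (List.mem_cons_self ..))
    rw [hx]

theorem foldl_max_replicate_zero (n : Nat) :
    (List.replicate n (0 : Int)).foldl max 0 = 0 := by
  rcases PySem.List.foldl_max_mem (List.replicate n (0 : Int)) 0 with h | h
  · exact h
  · exact List.eq_of_mem_replicate h

-- updating one entry upward moves the running max by a plain max
theorem foldl_max_set (xs : List Int) (j : Nat) (hj : j < xs.length) (w : Int)
    (hw : xs[j] ≤ w) :
    (xs.set j w).foldl max 0 = max (xs.foldl max 0) w := by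
  apply le_antisymm
  · rcases PySem.List.foldl_max_mem (xs.set j w) 0 with h | h
    · rw [h]
      exact le_max_of_le_left (PySem.List.le_foldl_max xs 0).1
    · rcases List.mem_or_eq_of_mem_set h with h' | h'
      · exact le_max_of_le_left ((PySem.List.le_foldl_max xs 0).2 _ h')
      · rw [h']
        exact le_max_right _ _
  · have hmem : ∀ y ∈ xs, y ≤ (xs.set j w).foldl max 0 := by
      intro y hy
      obtain ⟨i, hi, rfl⟩ := List.getElem_of_mem hy
      by_cases hij : i = j
      · subst hij
        calc xs[i] ≤ w := hw
          _ = (xs.set i w)[i]'(by simpa using hi) :=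
              (List.getElem_set_self (by simpa using hi)).symm
          _ ≤ _ := (PySem.List.le_foldl_max _ 0).2 _ (List.getElem_mem _)
      · have hne : (xs.set j w)[i]'(by simpa using hi) = xs[i] :=
          List.getElem_set_ne (by omega) (by simpa using hi)
        calc xs[i] = (xs.set j w)[i]'(by simpa using hi) := hne.symm
          _ ≤ _ := (PySem.List.le_foldl_max _ 0).2 _ (List.getElem_mem _)
    apply max_le
    · rcases PySem.List.foldl_max_mem xs 0 with h | h
      · rw [h]; exact (PySem.List.le_foldl_max _ 0).1
      · exact hmem _ h
    · have hmemw : w ∈ xs.set j w := by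
        have h1 : (xs.set j w)[j]'(by simpa using hj) = w :=
          List.getElem_set_self (by simpa using hj)
        have h2 := List.getElem_mem (l := xs.set j w) (n := j) (by simpa using hj)
        rwa [h1] at h2
      exact (PySem.List.le_foldl_max _ 0).2 _ hmemw

theorem pyIdx_some (n : Nat) (i : Int) (h : PySem.Raise.InRange n i) :
    ∃ k, PySem.List.pyIdx? n i = some k ∧ k < n := by
  obtain ⟨h1, h2⟩ := h
  unfold PySem.List.pyIdx?
  by_cases h0 : 0 ≤ i
  · exact ⟨i.toNat, by simp [h0, h2], by omega⟩
  · exact ⟨n - (-i).toNat, by simp [h0, h1], by omega⟩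

theorem pyGetD_idx {xs : List Int} {i : Int} {k : Nat} (d : Int)
    (hk : PySem.List.pyIdx? xs.length i = some k) :
    PySem.List.pyGetD xs i d = xs.getD k d := by
  unfold PySem.List.pyGetD PySem.List.pyGet?
  rw [hk]
  simp [List.getD]

theorem pySetD_idx {xs : List Int} {i : Int} {k : Nat} (v : Int)
    (hk : PySem.List.pyIdx? xs.length i = some k) :
    PySem.List.pySetD xs i v = xs.set k v := by
  unfold PySem.List.pySetD PySem.List.pySet?
  rw [hk]
  rfl

-- the coupling between A's state (counters, highest, max_to_set) and B's (base, counts)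
def SegInv (N : Int) (sA : List Int × Int × Int) (sB : Int × List Int) : Prop :=
  sA.1.length = N.toNat ∧ sB.2.length = N.toNat ∧ sA.2.2 = sB.1 ∧
  (∀ x ∈ sB.2, 0 ≤ x) ∧ sA.2.1 = sB.1 + sB.2.foldl max 0 ∧
  (∀ k, k < N.toNat → max (sA.1.getD k 0) sA.2.2 = sB.1 + sB.2.getD k 0)

theorem inv_step (N : Int) (sA : List Int × Int × Int) (sB : Int × List Int) (item : Int)
    (hpre : item = N + 1 ∨ PySem.Raise.InRange N.toNat (item - 1))
    (hinv : SegInv N sA sB) : SegInv N (stepA N sA item) (stepB N sB item) := by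
  obtain ⟨cA, hA, m⟩ := sA
  obtain ⟨b, cB⟩ := sB
  obtain ⟨hlA, hlB, hmb, hnn, hhi, hpt⟩ := hinv
  simp only at hlA hlB hmb hnn hhi hpt
  by_cases hit : item = N + 1
  · -- max-all operation: A freezes highest into max_to_set, B folds max(counts) into base
    have hstA : stepA N (cA, hA, m) item = (cA, hA, hA) := by simp [stepA, hit]
    have hstB : stepB N (b, cB) item = (b + cB.foldl max 0, List.replicate N.toNat 0) := by
      simp [stepB, hit, maxD_eq_foldl cB hnn]
    rw [hstA, hstB]
    refine ⟨hlA, by simp, by simp [hhi], ?_, ?_, ?_⟩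
    · intro x hx
      simp only at hx
      simp [List.eq_of_mem_replicate hx]
    · simp [foldl_max_replicate_zero, hhi]
    · intro k hk
      simp only
      have hle : cA.getD k 0 ≤ hA := by
        have h1 := hpt k hk
        have h2 : cB.getD k 0 ≤ cB.foldl max 0 := by
          rw [List.getD_eq_getElem _ _ (by omega)]
          exact (PySem.List.le_foldl_max _ 0).2 _ (List.getElem_mem _)
        have h3 : cA.getD k 0 ≤ max (cA.getD k 0) m := le_max_left _ _
        omega
      have hrep : (List.replicate N.toNat (0 : Int)).getD k 0 = 0 := by
        rw [List.getD_eq_getElem _ _ (by simpa using hk)]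
        simp
      rw [hrep, max_eq_right hle, hhi]
      ring
  · -- increment operation: both sides write the same slot, values differing by base
    have hin : PySem.Raise.InRange N.toNat (item - 1) := hpre.resolve_left hit
    obtain ⟨j, hj, hjlt⟩ := pyIdx_some N.toNat (item - 1) hin
    have hjA : PySem.List.pyIdx? cA.length (item - 1) = some j := by rwa [hlA]
    have hjB : PySem.List.pyIdx? cB.length (item - 1) = some j := by rwa [hlB]
    set v : Int := max (cA.getD j 0) m + 1 with hv
    set w : Int := cB.getD j 0 + 1 with hw
    have hvw : v = b + w := by have := hpt j hjlt; omega
    have hstA : stepA N (cA, hA, m) item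
        = (cA.set j v, if v > hA then v else hA, m) := by
      simp only [stepA, if_neg hit]
      rw [pyGetD_idx 0 hjA, pySetD_idx _ hjA]
    have hstB : stepB N (b, cB) item = (b, cB.set j w) := by
      simp only [stepB, if_neg hit]
      rw [pyGetD_idx 0 hjB, pySetD_idx _ hjB]
    rw [hstA, hstB]
    have hjB' : j < cB.length := by omega
    have hgej : cB.getD j 0 = cB[j] := List.getD_eq_getElem _ _ hjB'
    refine ⟨by simpa using hlA, by simpa using hlB, hmb, ?_, ?_, ?_⟩
    · intro x hx
      rcases List.mem_or_eq_of_mem_set hx with hx' | rfl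
      · exact hnn x hx'
      · have := hnn _ (hgej ▸ List.getElem_mem hjB'); omega
    · simp only
      rw [foldl_max_set cB j hjB' w (by omega)]
      have hif : (if v > hA then v else hA) = max hA v := by
        rw [max_def]
        by_cases h : v > hA
        · rw [if_pos h, if_pos (by omega)]
        · rw [if_neg h]
          by_cases h2 : hA ≤ v
          · rw [if_pos h2]; omega
          · rw [if_neg h2]
      rw [hif, hhi, hvw, ← max_add_add_left]
    · intro k hk
      simp only
      by_cases hkj : k = j
      · subst hkj
        have hkA : k < (cA.set k v).length := by
          simp only [List.length_set, hlA]; omega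
        have hkB : k < (cB.set k w).length := by
          simp only [List.length_set, hlB]; omega
        rw [List.getD_eq_getElem _ _ hkA, List.getD_eq_getElem _ _ hkB,
            List.getElem_set_self hkA, List.getElem_set_self hkB]
        have hmv : m < v := by
          have := le_max_right (cA.getD k 0) m
          omega
        rw [max_eq_left (le_of_lt hmv), hvw]
      · have hkA : k < cA.length := by omega
        have hkB : k < cB.length := by omega
        have hkA' : k < (cA.set j v).length := by simpa using hkA
        have hkB' : k < (cB.set j w).length := by simpa using hkB
        rw [List.getD_eq_getElem _ _ hkA', List.getD_eq_getElem _ _ hkB',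
            List.getElem_set_ne (fun h => hkj (by omega)) hkA',
            List.getElem_set_ne (fun h => hkj (by omega)) hkB',
            ← List.getD_eq_getElem _ 0 hkA, ← List.getD_eq_getElem _ 0 hkB]
        exact hpt k hk

theorem loop_inv (N : Int) : ∀ (A : List Int) (sA : List Int × Int × Int) (sB : Int × List Int),
    (∀ item ∈ A, item = N + 1 ∨ PySem.Raise.InRange N.toNat (item - 1)) →
    SegInv N sA sB → SegInv N (A.foldl (stepA N) sA) (A.foldl (stepB N) sB) := by
  intro A
  induction A with
  | nil => intro sA sB _ h; exact h
  | cons item A ih =>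
    intro sA sB hpre h
    exact ih _ _ (fun x hx => hpre x (List.mem_cons_of_mem _ hx))
      (inv_step N sA sB item (hpre item (List.mem_cons_self ..)) h)

-- The final reconciliation pass of A is a pointwise max over the counters.
theorem final_aux (m : Int) : ∀ (j : Nat) (xs : List Int), j ≤ xs.length →
    (PySem.List.pyRange 0 (j : Int) 1).foldl
        (fun ys i => PySem.List.pySetD ys i (max (PySem.List.pyGetD ys i 0) m)) xs
      = (xs.take j).map (fun x => max x m) ++ xs.drop j := by
  intro j
  induction j with
  | zero => intro xs _; simp [PySem.List.pyRange_one_eq_nil]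
  | succ j ih =>
    intro xs hj
    have hjc : j < xs.length := by omega
    have hsplit : PySem.List.pyRange 0 ((j + 1 : Nat) : Int) 1
        = PySem.List.pyRange 0 (j : Int) 1 ++ [(j : Int)] := by
      push_cast
      exact PySem.List.pyRange_one_succ_right (by positivity)
    rw [hsplit, List.foldl_append, ih xs (by omega)]
    simp only [List.foldl_cons, List.foldl_nil]
    have hlen' : ((xs.take j).map (fun x => max x m)).length = j := by
      simp [Nat.min_eq_left (le_of_lt hjc)]
    have hget : PySem.List.pyGetD ((xs.take j).map (fun x => max x m) ++ xs.drop j)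
        ((j : Nat) : Int) 0 = xs[j] := by
      rw [PySem.List.pyGetD_natCast,
          List.getD_eq_getElem _ _ (by simp; omega),
          List.getElem_append_right hlen'.le]
      simp only [List.length_map, List.length_take, List.getElem_drop]
      congr 1
      omega
    rw [hget, PySem.List.pySetD_natCast,
        List.set_append_right _ _ hlen'.le, hlen', Nat.sub_self,
        List.drop_eq_getElem_cons hjc, List.set_cons_zero]
    rw [List.take_add_one, List.getElem?_eq_getElem hjc, List.map_append]
    simp

theorem final_loop (N : Int) (xs : List Int) (m : Int) (hc : xs.length = N.toNat) :
    (PySem.List.pyRange 0 N 1).foldl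
        (fun ys i => PySem.List.pySetD ys i (max (PySem.List.pyGetD ys i 0) m)) xs
      = xs.map (fun x => max x m) := by
  by_cases hN : 0 ≤ N
  · have : N = ((N.toNat : Nat) : Int) := by omega
    rw [this, final_aux m N.toNat xs (by omega)]
    rw [← hc, List.take_length, List.drop_length, List.append_nil]
  · have h0 : xs = [] := List.eq_nil_of_length_eq_zero (by omega)
    rw [PySem.List.pyRange_one_eq_nil (by omega), h0]
    rfl

-- ===== VERDICT (by name: the statement is the Claim_ definition above) =====
theorem solution_spec : Claim_equal_solution := by
  intro N A _ hpre
  unfold Spec_solution solution solution_alt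
  have hinv0 : SegInv N (List.replicate N.toNat 0, 0, 0) (0, List.replicate N.toNat 0) := by
    refine ⟨by simp, by simp, rfl, ?_, ?_, ?_⟩
    · intro x hx; simp [List.eq_of_mem_replicate hx]
    · simp [foldl_max_replicate_zero]
    · intro k hk
      rw [List.getD_eq_getElem _ _ (by simpa using hk)]
      simp
  have h := loop_inv N A _ _ hpre hinv0
  obtain ⟨hlA, hlB, -, -, -, hpt⟩ := h
  rw [final_loop N _ _ hlA]
  apply List.ext_getElem (by simp [hlA, hlB])
  intro k h1 h2
  simp only [List.getElem_map]
  have hk : k < N.toNat := by simpa [hlA] using h1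
  have := hpt k hk
  rw [List.getD_eq_getElem _ _ (by omega), List.getD_eq_getElem _ _ (by omega)] at this
  simpa using this
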